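-- pv_equiv track=rewrite | github.com/AdamZhouSE/pythonHomework | Code/CodeRecords/2342/60788/274217.py | f
-- ===== SOURCE A (Python) =====
-- def f(s,k):
--     if len(s)>k:
--         first=s[:k]
--         second=s[k:]
--         first.reverse()
--         return first+f(second,k)
--     else:
--         s.reverse()
--         return s
-- ===== SOURCE B (Python) =====
-- def f(s, k):
--     if len(s) <= k:
--         s.reverse()
--         return s
--     result = []
--     for i in range(0, len(s), k):
--         block = s[i:i+k]
--         block.reverse()
--         result += block
--     return result
-- ===== Notes on version B (the rewrite author's own statement) =====
-- stated objective: simpler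
-- what changed: Replaces A's recursion (peel one k-block per call, copying the remaining tail with s[k:] at every step) with a single iterative forward loop over range(0, len(s), k) that appends each reversed slice to an accumulator; the short-input case still reverses s in place and returns the same object, like A.
import Mathlib
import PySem

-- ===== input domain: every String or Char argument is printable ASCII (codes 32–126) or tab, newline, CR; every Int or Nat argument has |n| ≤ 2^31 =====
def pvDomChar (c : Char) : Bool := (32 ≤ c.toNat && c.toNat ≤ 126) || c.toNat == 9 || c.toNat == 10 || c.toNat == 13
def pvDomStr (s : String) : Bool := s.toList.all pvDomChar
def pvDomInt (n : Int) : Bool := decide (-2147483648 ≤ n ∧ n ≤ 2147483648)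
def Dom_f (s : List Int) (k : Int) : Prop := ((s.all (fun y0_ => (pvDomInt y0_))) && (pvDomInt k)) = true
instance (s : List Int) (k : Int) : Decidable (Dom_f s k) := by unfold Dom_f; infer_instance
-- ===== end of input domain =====

-- B replaces A's per-block recursion by one iterative loop over range(0, len(s), k);
-- equivalence is about the RETURN value only (both mutate and return s itself exactly when len(s) <= k).

-- ===== PORT A =====
-- fuel makes A's recursion total in Lean; on Pre_ (k ≥ 1, or s empty with k ≥ 0) each
-- recursive call shortens s, so fuel s.length + 1 never runs out.
def fAux : Nat → List Int → Int → List Int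
  | 0, _, _ => []
  | fuel + 1, s, k =>
    if (s.length : Int) > k then
      (PySem.List.slice s none (some k)).reverse ++
        fAux fuel (PySem.List.slice s (some k) none) k
    else
      s.reverse

def f (s : List Int) (k : Int) : List Int := fAux (s.length + 1) s k

-- ===== PORT B =====
def f_alt (s : List Int) (k : Int) : List Int :=
  if (s.length : Int) ≤ k then
    s.reverse
  else
    (PySem.List.pyRange 0 (s.length : Int) k).foldl
      (fun result i => result ++ (PySem.List.slice s (some i) (some (i + k))).reverse) []

-- ===== PRECONDITION & SPEC =====
-- Pre_ excludes exactly the inputs on which A never returns (RecursionError):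
-- k ≤ 0 with s nonempty, and negative k with s empty.
def Pre_f (s : List Int) (k : Int) : Prop := 1 ≤ k ∨ (s = [] ∧ 0 ≤ k)
instance (s : List Int) (k : Int) : Decidable (Pre_f s k) := by unfold Pre_f; infer_instance
def pvWitness_f : List Int × Int := ([1, 2, 3, 4, 5], 2)
def Spec_f (s : List Int) (k : Int) (out : List Int) : Prop := out = f_alt s k
instance (s : List Int) (k : Int) (out : List Int) : Decidable (Spec_f s k out) := by unfold Spec_f; infer_instance

-- ===== CLAIM (what is proved, stated in full; the proofs are below) =====
def Claim_equal_f : Prop := ∀ (s : List Int) (k : Int), Dom_f s k → Pre_f s k → Spec_f s k (f s k)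

-- ===== LEMMAS AND PROOFS =====

-- B's loop, rewritten as a flatMap over the block starts.
def blocksF (s : List Int) (k : Int) : List Int :=
  (PySem.List.pyRange 0 (s.length : Int) k).flatMap
    (fun i => (PySem.List.slice s (some i) (some (i + k))).reverse)

theorem blocksF_eq (K : Nat) (hK : 0 < K) (s : List Int) :
    blocksF s (K : Int) =
      (List.range (if s.length = 0 then 0 else (s.length - 1) / K + 1)).flatMap
        (fun j => ((s.drop (K * j)).take K).reverse) := by
  unfold blocksF
  rw [PySem.List.pyRange_of_pos 0 (s.length : Int) (by exact_mod_cast hK)]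
  rcases Nat.eq_zero_or_pos s.length with h0 | hpos
  · rw [if_neg (by omega), if_pos h0]
    simp
  · rw [if_pos (by exact_mod_cast hpos), if_neg (by omega)]
    have hcount : (((s.length : Int) - 0 + (K : Int) - 1) / (K : Int)).toNat
        = (s.length - 1) / K + 1 := by
      have e1 : ((s.length : Int) - 0 + (K : Int) - 1)
          = ((s.length + K - 1 : Nat) : Int) := by omega
      rw [e1, ← Int.natCast_div, Int.toNat_natCast]
      have e2 : s.length + K - 1 = (s.length - 1) + K := by omega
      rw [e2, Nat.add_div_right _ hK]
    rw [hcount, List.flatMap_map]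
    apply List.flatMap_congr
    intro j _
    have h2 : (0 : Int) + (K : Int) * (j : Int) = ((K * j : Nat) : Int) := by push_cast; ring
    rw [h2, PySem.List.slice_natCast_add]

theorem f_alt_eq_blocksF (K : Nat) (hK : 0 < K) (s : List Int) :
    f_alt s (K : Int) = blocksF s (K : Int) := by
  unfold f_alt
  split
  · rename_i hle
    rw [blocksF_eq K hK]
    rcases Nat.eq_zero_or_pos s.length with h0 | hpos
    · rw [if_pos h0]
      simp [List.eq_nil_of_length_eq_zero h0]
    · rw [if_neg (by omega)]
      have hlt : s.length - 1 < K := by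
        have : (s.length : Int) ≤ (K : Int) := hle
        omega
      rw [Nat.div_eq_of_lt hlt]
      simp [List.take_of_length_le (by exact_mod_cast hle : s.length ≤ K)]
  · rw [PySem.List.foldl_append_eq_flatMap]
    simp [blocksF]

theorem blocksF_step (K : Nat) (hK : 0 < K) (s : List Int) (h : K < s.length) :
    blocksF s (K : Int) = (s.take K).reverse ++ blocksF (s.drop K) (K : Int) := by
  rw [blocksF_eq K hK, blocksF_eq K hK]
  have hlen : (s.drop K).length = s.length - K := by simp
  rw [if_neg (by omega), hlen, if_neg (by omega)]
  have hcount : (s.length - 1) / K + 1 = ((s.length - K - 1) / K + 1) + 1 := by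
    have h1 : s.length - 1 = (s.length - K - 1) + K := by omega
    rw [h1, Nat.add_div_right _ hK]
  rw [hcount, List.range_succ_eq_map, List.flatMap_cons, List.flatMap_map]
  rw [Nat.mul_zero, List.drop_zero]
  congr 1
  apply List.flatMap_congr
  intro j _
  rw [List.drop_drop]
  have e3 : K * Nat.succ j = K + K * j := by rw [Nat.succ_eq_add_one]; ring
  rw [e3]

theorem main_eq (K : Nat) (hK : 0 < K) :
    ∀ (fuel : Nat) (s : List Int), s.length < fuel → fAux fuel s (K : Int) = f_alt s (K : Int) := by
  intro fuel
  induction fuel with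
  | zero => intro s h; omega
  | succ fuel ih =>
    intro s h
    simp only [fAux]
    by_cases hc : (s.length : Int) > (K : Int)
    · rw [if_pos hc, PySem.List.slice_to_natCast, PySem.List.slice_from_natCast]
      have hKn : K < s.length := by exact_mod_cast hc
      have hdrop : (s.drop K).length < fuel := by simp; omega
      rw [ih (s.drop K) hdrop, f_alt_eq_blocksF K hK, f_alt_eq_blocksF K hK,
        ← blocksF_step K hK s hKn]
    · rw [if_neg hc]
      unfold f_alt
      rw [if_pos (by omega : (s.length : Int) ≤ (K : Int))]

-- ===== VERDICT (by name: the statement is the Claim_ definition above) =====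
theorem f_spec : Claim_equal_f := by
  intro s k _ hpre
  unfold Spec_f
  rcases hpre with hk | ⟨hs, hk0⟩
  · obtain ⟨K, rfl⟩ : ∃ K : Nat, k = (K : Int) := ⟨k.toNat, by omega⟩
    exact main_eq K (by exact_mod_cast hk) (s.length + 1) s (Nat.lt_succ_self _)
  · subst hs
    simp [f, fAux, f_alt, not_lt.mpr hk0]
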